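-- pv_equiv track=rewrite | github.com/jiny7157502/algorithm_study | Programmers/Heap/더 맵게_ver2.py | solution
-- ===== SOURCE A (Python) =====
-- import heapq
--
-- def solution(scoville, k):
--     count = 0
--     heapq.heapify(scoville)
--     while scoville[0] < k:
--         if len(scoville) == 1:
--             count = -1
--             break
--         else:
--             new = heapq.heappop(scoville) + heapq.heappop(scoville) * 2
--             heapq.heappush(scoville, new)
--             count += 1
--     return count
-- ===== SOURCE B (Python) =====
-- def solution(scoville, k):
--     # Two-queue technique: sort once, then newly combined values go into a plain
--     # FIFO list; each step pops the smaller of the two queue fronts (read pointers),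
--     # so no heap or mid-list insertion is ever needed.
--     # Like A, mutates scoville in place (A leaves a heap, B a sorted list).
--     scoville.sort()
--     n = len(scoville)
--     made = []
--     i = 0  # read pointer into scoville
--     j = 0  # read pointer into made
--     count = 0
--
--     def popmin():
--         nonlocal i, j
--         if j == len(made) or (i < n and scoville[i] <= made[j]):
--             i += 1
--             return scoville[i - 1]
--         j += 1
--         return made[j - 1]
--
--     while True:
--         if j == len(made) or (i < n and scoville[i] <= made[j]):
--             m = scoville[i]
--         else:
--             m = made[j]
--         if m >= k:
--             return count
--         if (n - i) + (len(made) - j) == 1: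
--             return -1
--         a = popmin()
--         b = popmin()
--         made.append(a + 2 * b)
--         count += 1
-- ===== Notes on version B (the rewrite author's own statement) =====
-- stated objective: alternative
-- what changed: Replaces the priority queue entirely with the two-queue merge technique: sort once, keep newly combined values in a plain FIFO list, and always pop the smaller of the two queue fronts via read pointers, so no heap operation or mid-list insertion is ever performed.
-- outside the precondition, e.g. on solution([], 7): A raises IndexError, B raises IndexError
import Mathlib
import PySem

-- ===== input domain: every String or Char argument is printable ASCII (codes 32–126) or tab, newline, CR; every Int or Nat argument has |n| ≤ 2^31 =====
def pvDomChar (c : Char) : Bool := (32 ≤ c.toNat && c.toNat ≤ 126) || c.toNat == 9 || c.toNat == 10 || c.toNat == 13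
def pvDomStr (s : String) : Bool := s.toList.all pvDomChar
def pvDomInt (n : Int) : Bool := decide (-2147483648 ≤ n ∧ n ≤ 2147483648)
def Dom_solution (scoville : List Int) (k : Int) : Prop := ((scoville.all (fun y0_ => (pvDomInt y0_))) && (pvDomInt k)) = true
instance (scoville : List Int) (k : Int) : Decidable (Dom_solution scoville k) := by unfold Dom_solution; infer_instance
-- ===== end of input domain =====

-- B drops the priority queue entirely: sort once, keep combined values in a FIFO list,
-- always pop the smaller of the two queue fronts (two-queue merge technique).
-- Both A and B mutate the Python argument in place (A leaves a heap, B a sorted list);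
-- the equivalence proved here is about the RETURN value only.

-- ===== PORT A =====
-- CPython heapq._siftdown(heap, startpos, pos): the while loop; heap[pos] is written
-- before it is ever read, so passing `newitem` explicitly is step-for-step identical.
-- fuel is a totality guard only (pos strictly decreases, so fuel = pos suffices).
def sdGo : Nat → List Int → Nat → Int → Nat → List Int
  | 0, heap, _, newitem, pos => heap.set pos newitem
  | fuel + 1, heap, startpos, newitem, pos =>
    if startpos < pos then
      let parentpos := (pos - 1) / 2
      let parent := heap.getD parentpos 0
      if newitem < parent then
        sdGo fuel (heap.set pos parent) startpos newitem parentpos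
      else heap.set pos newitem
    else heap.set pos newitem

-- CPython heapq._siftup(heap, pos): bubble the smaller child up to the hole, then _siftdown.
-- fuel is a totality guard only (heap.length - pos strictly decreases).
def suGo : Nat → List Int → Nat → Int → Nat → List Int
  | 0, heap, startpos, newitem, pos => sdGo pos heap startpos newitem pos
  | fuel + 1, heap, startpos, newitem, pos =>
    if 2 * pos + 1 < heap.length then
      let childpos := 2 * pos + 1
      let rightpos := childpos + 1
      let childpos2 := if rightpos < heap.length ∧ ¬ (heap.getD childpos 0 < heap.getD rightpos 0)
        then rightpos else childpos
      suGo fuel (heap.set pos (heap.getD childpos2 0)) startpos newitem childpos2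
    else sdGo pos heap startpos newitem pos

def siftup (heap : List Int) (pos : Nat) : List Int := suGo heap.length heap pos (heap.getD pos 0) pos

-- heapq.heapify: for i in reversed(range(n//2)): _siftup(x, i)
def heapifyGo (x : List Int) (i : Nat) : List Int :=
  match i with
  | 0 => x
  | j + 1 => heapifyGo (siftup x j) j

def heapify (x : List Int) : List Int := heapifyGo x (x.length / 2)

-- heapq.heappush: heap.append(item); _siftdown(heap, 0, len(heap)-1)
def heappush (heap : List Int) (item : Int) : List Int :=
  sdGo heap.length (heap ++ [item]) 0 item heap.length

-- heapq.heappop: lastelt = heap.pop(); if heap: return heap[0] after heap[0]=lastelt; _siftup(heap,0)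
def heappop (heap : List Int) : Int × List Int :=
  let lastelt := heap.getLastD 0
  let rest := heap.dropLast
  if rest.isEmpty then (lastelt, rest)
  else (rest.getD 0 0, siftup (rest.set 0 lastelt) 0)

-- the while loop of A; fuel (= the initial length, which bounds the iteration count) and the
-- `heap.length < 2` branch are totality guards only: under Pre_solution neither is ever taken
-- on a state Python reaches (Python raises IndexError on []).
def loopA : Nat → List Int → Int → Int → Int
  | 0, _, _, count => count
  | fuel + 1, heap, k, count =>
    if heap.getD 0 0 < k then
      if heap.length = 1 then -1
      else if heap.length < 2 then count
      else
        let p1 := heappop heap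
        let p2 := heappop p1.2
        loopA fuel (heappush p2.2 (p1.1 + p2.1 * 2)) k (count + 1)
    else count

def solution (scoville : List Int) (k : Int) : Int :=
  loopA scoville.length (heapify scoville) k 0

-- ===== PORT B =====
-- Source B's `m = …` head comparison: the smaller of the two queue fronts
-- (the `[], []` case is a totality guard: Python raises IndexError there, outside Pre_).
def frontMin (base made : List Int) : Int :=
  match base, made with
  | b :: _, [] => b
  | b :: _, m :: _ => if b ≤ m then b else m
  | [], m :: _ => m
  | [], [] => 0

-- Source B's popmin(): advance the pointer whose front is smaller; suffix lists model the pointers.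
def popMin (base made : List Int) : Int × List Int × List Int :=
  match base, made with
  | b :: bt, [] => (b, bt, [])
  | b :: bt, m :: mt => if b ≤ m then (b, bt, m :: mt) else (m, b :: bt, mt)
  | [], m :: mt => (m, [], mt)
  | [], [] => (0, [], [])

-- Source B's while loop; fuel (= the initial length, bounding the iteration count) and the
-- `length = 0` branch are totality guards only (Python raises IndexError on the empty pool).
def loopTQ : Nat → List Int → List Int → Int → Int → Int
  | 0, _, _, _, _ => 0
  | fuel + 1, base, made, k, count =>
    if base.length + made.length = 0 then 0
    else if k ≤ frontMin base made then count
    else if base.length + made.length = 1 then -1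
    else
      let p1 := popMin base made
      let p2 := popMin p1.2.1 p1.2.2
      loopTQ fuel p2.2.1 (p2.2.2 ++ [p1.1 + 2 * p2.1]) k (count + 1)

def solution_alt (scoville : List Int) (k : Int) : Int :=
  loopTQ scoville.length (PySem.List.sorted scoville (fun x => x)) [] k 0

-- ===== PRECONDITION & SPEC =====
-- Pre_ excludes only the empty list, on which A raises IndexError at scoville[0].
def Pre_solution (scoville : List Int) (k : Int) : Prop := scoville ≠ []
instance (scoville : List Int) (k : Int) : Decidable (Pre_solution scoville k) := by
  unfold Pre_solution; infer_instance

def pvWitness_solution : List Int × Int := ([1, 2, 3, 9, 10, 12], 7)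

def Spec_solution (scoville : List Int) (k : Int) (out : Int) : Prop := out = solution_alt scoville k
instance (scoville : List Int) (k : Int) (out : Int) : Decidable (Spec_solution scoville k out) := by unfold Spec_solution; infer_instance

-- ===== CLAIM (what is proved, stated in full; the proofs are below) =====
def Claim_equal_solution : Prop := ∀ (scoville : List Int) (k : Int), Dom_solution scoville k → Pre_solution scoville k → Spec_solution scoville k (solution scoville k)

-- ===== LEMMAS AND PROOFS =====

-- canonical reference recursion on a sorted list (proof device shared by both sides)
def insortB (s : List Int) (v : Int) : List Int :=
  PySem.List.insert s ((PySem.List.bisectRight s v : Nat) : Int) v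

def canon (s : List Int) (k : Int) (count : Int) : Int :=
  match s with
  | [] => 0
  | [a] => if a < k then -1 else count
  | a :: b :: t => if a < k then canon (insortB t (a + 2 * b)) k (count + 1) else count
termination_by s.length
decreasing_by simp [insortB, PySem.List.insert]

-- WF twins of the fuel ports (proof devices: the bridges below show the ports equal them)
def sdGoW (heap : List Int) (startpos : Nat) (newitem : Int) (pos : Nat) : List Int :=
  if _h : startpos < pos then
    let parentpos := (pos - 1) / 2
    let parent := heap.getD parentpos 0
    if newitem < parent then
      sdGoW (heap.set pos parent) startpos newitem parentpos
    else heap.set pos newitem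
  else heap.set pos newitem
termination_by pos
decreasing_by omega

def suGoW (heap : List Int) (startpos : Nat) (newitem : Int) (pos : Nat) : List Int :=
  if _h : 2 * pos + 1 < heap.length then
    let childpos := 2 * pos + 1
    let rightpos := childpos + 1
    let childpos2 := if rightpos < heap.length ∧ ¬ (heap.getD childpos 0 < heap.getD rightpos 0)
      then rightpos else childpos
    suGoW (heap.set pos (heap.getD childpos2 0)) startpos newitem childpos2
  else sdGoW heap startpos newitem pos
termination_by heap.length - pos
decreasing_by simp only [List.length_set]; split <;> omega

theorem sdGo_eqW : ∀ (fuel : Nat) (heap : List Int) (s : Nat) (it : Int) (pos : Nat),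
    pos ≤ fuel → sdGo fuel heap s it pos = sdGoW heap s it pos := by
  intro fuel
  induction fuel with
  | zero =>
    intro heap s it pos hf
    have : pos = 0 := by omega
    subst this
    rw [sdGo, sdGoW, dif_neg (by omega)]
  | succ f ih =>
    intro heap s it pos hf
    rw [sdGo, sdGoW]
    by_cases h1 : s < pos
    · rw [if_pos h1, dif_pos h1]
      dsimp only
      by_cases h2 : it < heap.getD ((pos - 1) / 2) 0
      · rw [if_pos h2, if_pos h2]
        exact ih _ _ _ _ (by omega)
      · rw [if_neg h2, if_neg h2]
    · rw [if_neg h1, dif_neg h1]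

theorem suGo_eqW : ∀ (fuel : Nat) (heap : List Int) (s : Nat) (it : Int) (pos : Nat),
    heap.length - pos ≤ fuel → suGo fuel heap s it pos = suGoW heap s it pos := by
  intro fuel
  induction fuel with
  | zero =>
    intro heap s it pos hf
    rw [suGo, suGoW, dif_neg (by omega)]
    exact sdGo_eqW pos heap s it pos (le_refl _)
  | succ f ih =>
    intro heap s it pos hf
    rw [suGo, suGoW]
    by_cases h1 : 2 * pos + 1 < heap.length
    · rw [if_pos h1, dif_pos h1]
      dsimp only
      apply ih
      simp only [List.length_set]
      split <;> omega
    · rw [if_neg h1, dif_neg h1]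
      exact sdGo_eqW pos heap s it pos (le_refl _)

theorem siftup_eqW (heap : List Int) (pos : Nat) :
    siftup heap pos = suGoW heap pos (heap.getD pos 0) pos := by
  rw [siftup]
  exact suGo_eqW heap.length heap pos (heap.getD pos 0) pos (by omega)

theorem heappush_eqW (heap : List Int) (item : Int) :
    heappush heap item = sdGoW (heap ++ [item]) 0 item heap.length := by
  rw [heappush]
  exact sdGo_eqW heap.length (heap ++ [item]) 0 item heap.length (le_refl _)

theorem sdGoW_length (heap : List Int) (s : Nat) (it : Int) (pos : Nat) :
    (sdGoW heap s it pos).length = heap.length := by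
  fun_induction sdGoW <;> simp_all

theorem suGoW_length (heap : List Int) (s : Nat) (it : Int) (pos : Nat) :
    (suGoW heap s it pos).length = heap.length := by
  fun_induction suGoW <;> simp_all [sdGoW_length]

theorem siftup_length (heap : List Int) (pos : Nat) :
    (siftup heap pos).length = heap.length := by
  simp [siftup_eqW, suGoW_length]

theorem heappush_length (heap : List Int) (x : Int) :
    (heappush heap x).length = heap.length + 1 := by
  simp [heappush_eqW, sdGoW_length]

theorem popMin_len (base made : List Int) (h : base.length + made.length ≠ 0) :
    (popMin base made).2.1.length + (popMin base made).2.2.length + 1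
      = base.length + made.length := by
  unfold popMin
  rcases base with _ | ⟨b, bt⟩ <;> rcases made with _ | ⟨m, mt⟩ <;> simp_all
  split <;> simp <;> omega

def PH (l : List Int) (m : Nat) : Prop :=
  ∀ i, 0 < i → i < l.length → m ≤ (i - 1) / 2 → l.getD ((i - 1) / 2) 0 ≤ l.getD i 0

def inSub (m i : Nat) : Bool :=
  if _h : i ≤ m then i == m else inSub m ((i - 1) / 2)
termination_by i
decreasing_by omega

theorem inSub_self (m : Nat) : inSub m m = true := by unfold inSub; simp

theorem inSub_le (m i : Nat) (h : inSub m i = true) : m ≤ i := by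
  fun_induction inSub <;> simp_all <;> omega

theorem inSub_par (m i : Nat) (h : inSub m i = true) (hne : i ≠ m) :
    m ≤ (i - 1) / 2 ∧ inSub m ((i - 1) / 2) = true := by
  rw [inSub] at h
  split at h
  · simp at h; omega
  · exact ⟨inSub_le _ _ h, h⟩

theorem inSub_zero (i : Nat) : inSub 0 i = true := by
  induction i using Nat.strong_induction_on with
  | _ i ih =>
    rw [inSub]
    split
    · simp; omega
    · exact ih _ (by omega)

theorem getD_set_self (l : List Int) (i : Nat) (a : Int) (h : i < l.length) :
    (l.set i a).getD i 0 = a := by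
  simp [List.getD_eq_getElem?_getD, h]

theorem getD_set_ne (l : List Int) (i j : Nat) (a : Int) (h : i ≠ j) :
    (l.set i a).getD j 0 = l.getD j 0 := by
  simp [List.getD_eq_getElem?_getD, List.getElem?_set_ne h]

theorem PH_set (heap : List Int) (m pos : Nat) (item : Int) (hlt : pos < heap.length)
    (h1 : ∀ i, 0 < i → i < heap.length → i ≠ pos → (i - 1) / 2 ≠ pos → m ≤ (i - 1) / 2 →
        heap.getD ((i - 1) / 2) 0 ≤ heap.getD i 0)
    (h2 : ∀ i, 0 < i → i < heap.length → (i - 1) / 2 = pos → item ≤ heap.getD i 0)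
    (hstop : 0 < pos → m ≤ (pos - 1) / 2 → heap.getD ((pos - 1) / 2) 0 ≤ item) :
    PH (heap.set pos item) m := by
  intro i hi hile hmi
  rw [List.length_set] at hile
  by_cases hip : i = pos
  · subst hip
    rw [getD_set_self _ _ _ hlt, getD_set_ne _ _ _ _ (by omega)]
    exact hstop hi hmi
  · by_cases hpp : (i - 1) / 2 = pos
    · rw [hpp, getD_set_self _ _ _ hlt, getD_set_ne _ _ _ _ (Ne.symm hip)]
      exact h2 i hi hile hpp
    · rw [getD_set_ne _ _ _ _ (fun hh => hpp hh.symm), getD_set_ne _ _ _ _ (Ne.symm hip)]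
      exact h1 i hi hile hip hpp hmi

theorem sdGoW_PH (m : Nat) (item : Int) :
    ∀ pos heap, pos < (heap : List Int).length → inSub m pos = true →
    (∀ i, 0 < i → i < heap.length → i ≠ pos → (i - 1) / 2 ≠ pos → m ≤ (i - 1) / 2 →
        heap.getD ((i - 1) / 2) 0 ≤ heap.getD i 0) →
    (∀ i, 0 < i → i < heap.length → (i - 1) / 2 = pos → item ≤ heap.getD i 0) →
    (∀ i, 0 < i → i < heap.length → (i - 1) / 2 = pos → m < pos →
        heap.getD ((pos - 1) / 2) 0 ≤ heap.getD i 0) →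
    PH (sdGoW heap m item pos) m := by
  intro pos
  induction pos using Nat.strong_induction_on with
  | _ pos ih =>
    intro heap hlt hsub h1 h2 h3
    rw [sdGoW]
    split
    · -- m < pos
      rename_i hmp
      dsimp only
      split
      · -- item < parent : recurse at p := (pos-1)/2 on heap.set pos parent
        rename_i hcmp
        have hppos : (pos - 1) / 2 < pos := by omega
        have hpar := inSub_par m pos hsub (by omega)
        have hplt : (pos - 1) / 2 < heap.length := by omega
        apply ih _ hppos
        · simpa using hplt
        · exact hpar.2
        · -- Inv1'
          intro i hi hile hip hpp hmi
          rw [List.length_set] at hile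
          by_cases hipos : i = pos
          · subst hipos
            rw [getD_set_self _ _ _ hlt]
            exact absurd rfl hpp
          · rw [getD_set_ne _ _ _ _ (Ne.symm hipos)]
            by_cases hppp : (i - 1) / 2 = pos
            · rw [hppp, getD_set_self _ _ _ hlt]
              exact h3 i hi hile hppp hmp
            · rw [getD_set_ne _ _ _ _ (fun hh => hppp hh.symm)]
              exact h1 i hi hile hipos hppp hmi
        · -- Inv2'
          intro i hi hile hpp
          rw [List.length_set] at hile
          by_cases hipos : i = pos
          · subst hipos
            rw [getD_set_self _ _ _ hlt]
            exact le_of_lt hcmp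
          · rw [getD_set_ne _ _ _ _ (Ne.symm hipos)]
            have : (i - 1) / 2 ≠ pos := by omega
            have hle := h1 i hi hile hipos this (hpp ▸ hpar.1)
            rw [hpp] at hle
            exact le_trans (le_of_lt hcmp) hle
        · -- Inv3'
          intro i hi hile hpp hmpp
          rw [List.length_set] at hile
          have hgp : ((pos - 1) / 2 - 1) / 2 ≠ pos := by omega
          have hgp2 : ((pos - 1) / 2 - 1) / 2 < (pos - 1) / 2 := by omega
          rw [getD_set_ne _ _ _ _ (by omega)]
          have hpar2 := inSub_par m ((pos - 1) / 2) hpar.2 (by omega)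
          by_cases hipos : i = pos
          · subst hipos
            rw [getD_set_self _ _ _ hlt]
            exact h1 _ (by omega) hplt (by omega) hgp hpar2.1
          · rw [getD_set_ne _ _ _ _ (Ne.symm hipos)]
            have e1 := h1 _ (by omega) hplt (by omega) hgp hpar2.1
            have e2 := h1 i hi hile hipos (by omega) (hpp ▸ hpar.1)
            rw [hpp] at e2
            exact le_trans e1 e2
      · -- parent ≤ item : place item
        rename_i hcmp
        exact PH_set heap m pos item hlt h1 h2 (fun _ _ => le_of_not_gt hcmp)
    · -- pos = m
      rename_i hmp
      have hpm : pos = m := by have := inSub_le m pos hsub; omega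
      apply PH_set heap m pos item hlt h1 h2
      intro hp0 hmle
      omega

theorem suGoW_PH (m : Nat) (item : Int) :
    ∀ fuel pos heap, (heap : List Int).length - pos = fuel → pos < heap.length →
    inSub m pos = true →
    (∀ i, 0 < i → i < heap.length → i ≠ pos → (i - 1) / 2 ≠ pos → m ≤ (i - 1) / 2 →
        heap.getD ((i - 1) / 2) 0 ≤ heap.getD i 0) →
    (∀ i, 0 < i → i < heap.length → (i - 1) / 2 = pos → m < pos →
        heap.getD ((pos - 1) / 2) 0 ≤ heap.getD i 0) →
    PH (suGoW heap m item pos) m := by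
  intro fuel
  induction fuel using Nat.strong_induction_on with
  | _ fuel ih =>
    intro pos heap hfuel hlt hsub k1 k2
    rw [suGoW]
    split
    · -- has a child
      rename_i hchild
      have hc1 : 2*pos+1 ≤ (if 2*pos+1+1 < heap.length ∧
            ¬ (heap.getD (2*pos+1) 0 < heap.getD (2*pos+1+1) 0) then 2*pos+1+1 else 2*pos+1)
          ∧ (if 2*pos+1+1 < heap.length ∧
            ¬ (heap.getD (2*pos+1) 0 < heap.getD (2*pos+1+1) 0) then 2*pos+1+1 else 2*pos+1)
            < heap.length := by
        split <;> omega
      dsimp only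
      set c := (if 2*pos+1+1 < heap.length ∧
            ¬ (heap.getD (2*pos+1) 0 < heap.getD (2*pos+1+1) 0) then 2*pos+1+1 else 2*pos+1)
        with hcdef
      obtain ⟨hcl, hcu⟩ := hc1
      have hcpar : (c - 1) / 2 = pos := by
        rw [hcdef]; split <;> omega
      have hcgt : pos < c := by omega
      have hcmin : ∀ o, 0 < o → o < heap.length → (o - 1) / 2 = pos →
          heap.getD c 0 ≤ heap.getD o 0 := by
        intro o ho holt hopar
        have hrange : o = 2*pos+1 ∨ o = 2*pos+1+1 := by omega
        rw [hcdef]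
        split
        · rename_i hcond
          rcases hrange with rfl | rfl
          · exact le_of_not_gt hcond.2
          · exact le_refl _
        · rename_i hcond
          rcases hrange with rfl | rfl
          · exact le_refl _
          · exact le_of_lt (by
              rcases not_and_or.mp hcond with hb | hb
              · exact absurd holt hb
              · exact not_not.mp hb)
      have hsub' : inSub m c = true := by
        rw [inSub]
        have hml := inSub_le m pos hsub
        split
        · omega
        · rw [hcpar]; exact hsub
      apply ih (heap.length - c) (by omega) c
      · simp [List.length_set]
      · simpa using hcu
      · exact hsub'
      · -- K1'
        intro i hi hile hic hpic hmi
        rw [List.length_set] at hile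
        by_cases hipos : i = pos
        · subst hipos
          rw [getD_set_self _ _ _ hlt, getD_set_ne _ _ _ _ (by omega)]
          exact k2 c (by omega) hcu hcpar (by omega)
        · rw [getD_set_ne _ _ _ _ (Ne.symm hipos)]
          by_cases hpp : (i - 1) / 2 = pos
          · rw [hpp, getD_set_self _ _ _ hlt]
            exact hcmin i hi hile hpp
          · rw [getD_set_ne _ _ _ _ (fun hh => hpp hh.symm)]
            exact k1 i hi hile hipos hpp hmi
      · -- K2'
        intro i hi hile hpic hmc
        rw [List.length_set] at hile
        rw [hcpar, getD_set_self _ _ _ hlt,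
          getD_set_ne _ _ _ _ (by omega)]
        have hk := k1 i hi hile (by omega) (by omega) (by omega)
        rw [hpic] at hk
        exact hk
    · -- leaf: siftdown
      rename_i hchild
      apply sdGoW_PH m item pos heap hlt hsub k1
      · intro i hi hile hpp
        omega
      · exact k2

def IsHeap (l : List Int) : Prop := PH l 0

theorem isHeap_root_min (l : List Int) (hl : IsHeap l) :
    ∀ i, i < l.length → l.getD 0 0 ≤ l.getD i 0 := by
  intro i
  induction i using Nat.strong_induction_on with
  | _ i ih =>
    intro hi
    rcases Nat.eq_zero_or_pos i with h0 | h0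
    · subst h0; exact le_refl _
    · exact le_trans (ih ((i - 1) / 2) (by omega) (by omega)) (hl i h0 hi (Nat.zero_le _))

-- permutation lemmas
theorem count_set (l : List Int) (i : Nat) (a b : Int) (h : i < l.length) :
    (l.set i a).count b + (if l.getD i 0 = b then 1 else 0)
      = l.count b + (if a = b then 1 else 0) := by
  have hd : l.getD i 0 = l[i] := by simp [List.getD_eq_getElem?_getD, List.getElem?_eq_getElem h]
  have h2 : (l.take i ++ l[i] :: l.drop (i+1)).count b = l.count b := by
    rw [← List.drop_eq_getElem_cons h, List.take_append_drop]
  rw [List.set_eq_take_append_cons_drop, if_pos h, hd, ← h2]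
  simp only [List.count_append, List.count_cons]
  split <;> split <;> simp_all <;> omega

theorem set_set_perm (l : List Int) (i j : Nat) (x : Int) (hij : i ≠ j)
    (hi : i < l.length) (hj : j < l.length) :
    ((l.set i (l.getD j 0)).set j x).Perm (l.set i x) := by
  rw [List.perm_iff_count]
  intro b
  have hj' : j < (l.set i (l.getD j 0)).length := by simpa using hj
  have c1 := count_set (l.set i (l.getD j 0)) j x b hj'
  have c2 := count_set l i (l.getD j 0) b hi
  have c3 := count_set l i x b hi
  have h1 : (l.set i (l.getD j 0)).getD j 0 = l.getD j 0 := by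
    simp [List.getD_eq_getElem?_getD, List.getElem?_set_ne hij]
  rw [h1] at c1
  omega

theorem sdGoW_perm (heap : List Int) (m : Nat) (item : Int) (pos : Nat)
    (h : pos < heap.length) :
    (sdGoW heap m item pos).Perm (heap.set pos item) := by
  fun_induction sdGoW heap m item pos with
  | case1 heap pos hlt parentpos parent hcmp ih =>
    have hpar : parentpos < heap.length := by simp only [parentpos]; omega
    have := ih (by simpa using hpar)
    exact this.trans (set_set_perm heap pos parentpos item (by simp only [parentpos]; omega) h hpar)
  | case2 => exact List.Perm.refl _
  | case3 => exact List.Perm.refl _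

theorem suGoW_perm (heap : List Int) (m : Nat) (item : Int) (pos : Nat)
    (h : pos < heap.length) :
    (suGoW heap m item pos).Perm (heap.set pos item) := by
  fun_induction suGoW heap m item pos with
  | case1 heap pos hlt childpos rightpos childpos2 ih =>
    have hc : childpos2 < heap.length := by
      simp only [childpos2, childpos, rightpos]; split <;> omega
    have hne : pos ≠ childpos2 := by
      simp only [childpos2, childpos, rightpos]; split <;> omega
    have := ih (by simpa using hc)
    exact this.trans (set_set_perm heap pos childpos2 item hne h hc)
  | case2 heap pos hlt => exact sdGoW_perm heap _ item pos h

theorem siftup_perm (heap : List Int) (pos : Nat) (h : pos < heap.length) :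
    (siftup heap pos).Perm heap := by
  have hp := suGoW_perm heap pos (heap.getD pos 0) pos h
  rw [siftup_eqW]
  have : heap.set pos (heap.getD pos 0) = heap := by
    have hd : heap.getD pos 0 = heap[pos] := by
      simp [List.getD_eq_getElem?_getD, List.getElem?_eq_getElem h]
    rw [hd, List.set_getElem_self]
  rwa [this] at hp

theorem heapifyGo_perm : ∀ (i : Nat) (x : List Int), i ≤ x.length / 2 →
    (heapifyGo x i).Perm x := by
  intro i
  induction i with
  | zero => intro x _; exact List.Perm.refl _
  | succ j ih =>
    intro x h
    have hj : j < x.length := by omega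
    have hlen : (siftup x j).length = x.length := siftup_length _ _
    exact (ih (siftup x j) (by omega)).trans (siftup_perm x j hj)

theorem heapify_perm (x : List Int) : (heapify x).Perm x :=
  heapifyGo_perm _ _ (le_refl _)

theorem heappush_perm (h : List Int) (x : Int) : (heappush h x).Perm (x :: h) := by
  have hlt : h.length < (h ++ [x]).length := by simp
  have hp := sdGoW_perm (h ++ [x]) 0 x h.length hlt
  have hset : (h ++ [x]).set h.length x = h ++ [x] := by
    simp [List.set_append_right]
  rw [heappush_eqW]
  exact (hset ▸ hp).trans (List.perm_append_singleton x h)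

theorem heappop_cons_concat (b : Int) (t : List Int) (z : Int) :
    heappop (b :: (t ++ [z])) = (b, siftup (z :: t) 0) := by
  have hshape : b :: (t ++ [z]) = (b :: t) ++ [z] := by simp
  have h1 : (b :: (t ++ [z])).dropLast = b :: t := by
    rw [hshape, List.dropLast_concat]
  have h2 : (b :: (t ++ [z])).getLastD 0 = z := by
    rw [List.getLastD_eq_getLast?, hshape, List.getLast?_concat]; rfl
  simp only [heappop, h1, h2, List.isEmpty_cons, Bool.false_eq_true, if_false,
    List.set_cons_zero, List.getD_cons_zero]

theorem heappop_perm (h : List Int) (hne : h ≠ []) :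
    h.Perm ((heappop h).1 :: (heappop h).2) := by
  rcases List.eq_nil_or_concat h with rfl | ⟨ys, z, rfl⟩
  · exact absurd rfl hne
  · rcases ys with _ | ⟨b, t⟩
    · simp [heappop]
    · rw [List.concat_eq_append, show (b :: t) ++ [z] = b :: (t ++ [z]) from by simp,
        heappop_cons_concat]
      have hsp : (siftup (z :: t) 0).Perm (z :: t) := siftup_perm _ 0 (by simp)
      refine List.Perm.trans ?_ (hsp.symm.cons b)
      exact (List.perm_append_singleton z t).cons b

theorem heappop_fst (h : List Int) (hne : h ≠ []) : (heappop h).1 = h.getD 0 0 := by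
  rcases List.eq_nil_or_concat h with rfl | ⟨ys, z, rfl⟩
  · exact absurd rfl hne
  · rcases ys with _ | ⟨b, t⟩
    · simp [heappop]
    · rw [List.concat_eq_append, show (b :: t) ++ [z] = b :: (t ++ [z]) from by simp,
        heappop_cons_concat]
      simp

-- insortB inserts v into a sorted list keeping it sorted
theorem insert_natCast (t : List Int) (i : Nat) (v : Int) (hi : i ≤ t.length) :
    PySem.List.insert t (i : Int) v = t.take i ++ v :: t.drop i := by
  have h1 : (PySem.List.sliceIndices t.length (some (i : Int)) none 1).1 = (i : Int) := by
    simp [PySem.List.sliceIndices]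
    omega
  simp [PySem.List.insert, h1]

theorem insortB_eq (s : List Int) (v : Int) (hs : s.Pairwise (· ≤ ·)) :
    insortB s v = s.take (PySem.List.bisectRight s v) ++ v :: s.drop (PySem.List.bisectRight s v) := by
  rw [insortB]
  exact insert_natCast s _ v (PySem.List.bisectRight_spec s v hs).1

theorem insortB_perm (s : List Int) (v : Int) (hs : s.Pairwise (· ≤ ·)) :
    (insortB s v).Perm (v :: s) := by
  rw [insortB_eq s v hs]
  exact List.perm_middle.trans (by rw [List.take_append_drop])

theorem insortB_sorted (s : List Int) (v : Int) (hs : s.Pairwise (· ≤ ·)) :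
    (insortB s v).Pairwise (· ≤ ·) := by
  rw [insortB_eq s v hs]
  obtain ⟨hle, hlow, hhigh⟩ := PySem.List.bisectRight_spec s v hs
  set i := PySem.List.bisectRight s v
  have hdropmem : ∀ y ∈ s.drop i, v ≤ y := by
    intro y hy
    obtain ⟨j, hj, rfl⟩ := List.mem_iff_getElem.mp hy
    rw [List.getElem_drop]
    have hj' : i + j < s.length := by rw [List.length_drop] at hj; omega
    exact le_of_lt (hhigh (i + j) hj' (by omega))
  have htakemem : ∀ x ∈ s.take i, x ≤ v := by
    intro x hx
    obtain ⟨j, hj, rfl⟩ := List.mem_iff_getElem.mp hx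
    rw [List.length_take] at hj
    rw [List.getElem_take]
    exact hlow j (by omega) (by omega)
  rw [List.pairwise_append]
  refine ⟨hs.sublist (List.take_sublist _ _), ?_, ?_⟩
  · rw [List.pairwise_cons]
    exact ⟨hdropmem, hs.sublist (List.drop_sublist _ _)⟩
  · intro x hx y hy
    rcases List.mem_cons.mp hy with rfl | hy'
    · exact htakemem x hx
    · exact le_trans (htakemem x hx) (hdropmem y hy')

theorem heapifyGo_PH : ∀ (i : Nat) (x : List Int), i ≤ x.length / 2 → PH x i →
    PH (heapifyGo x i) 0 := by
  intro i
  induction i with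
  | zero => intro x _ hx; exact hx
  | succ j ihj =>
    intro x hle hx
    have hjlt : j < x.length := by omega
    have hsu : PH (siftup x j) j := by
      rw [siftup_eqW]
      apply suGoW_PH j (x.getD j 0) (x.length - j) j x rfl hjlt (inSub_self j)
      · intro i hi hile hij hpij hjle
        exact hx i hi hile (by omega)
      · intro i _ _ _ hlt
        omega
    have hlen : (siftup x j).length = x.length := siftup_length x j
    exact ihj (siftup x j) (by omega) hsu

theorem heapify_isHeap (x : List Int) : IsHeap (heapify x) := by
  rw [IsHeap]
  rw [heapify]
  apply heapifyGo_PH _ _ (le_refl _)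
  intro i hi hile hmi
  omega

theorem heappush_isHeap (h : List Int) (x : Int) (hh : IsHeap h) : IsHeap (heappush h x) := by
  rw [IsHeap] at hh ⊢
  rw [heappush_eqW]
  have hget : ∀ j, j < h.length → (h ++ [x]).getD j 0 = h.getD j 0 := by
    intro j hj
    simp [List.getD_eq_getElem?_getD, List.getElem?_append_left hj]
  refine sdGoW_PH 0 x h.length (h ++ [x]) (by simp) (inSub_zero _) ?_ ?_ ?_
  · intro i hi hile hine hpine _
    rw [List.length_append, List.length_cons, List.length_nil] at hile
    have hiu : i < h.length := by omega
    have hpu : (i - 1) / 2 < h.length := by omega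
    rw [hget _ hiu, hget _ hpu]
    exact hh i hi hiu (Nat.zero_le _)
  · intro i hi hile hpi
    simp at hile
    omega
  · intro i hi hile hpi _
    simp at hile
    omega

theorem heappop_isHeap (h : List Int) (hh : IsHeap h) : IsHeap (heappop h).2 := by
  rw [IsHeap] at hh ⊢
  rcases List.eq_nil_or_concat h with rfl | ⟨ys, z, rfl⟩
  · intro i hi hile hmi
    simp [heappop] at hile
  · rcases ys with _ | ⟨b, t⟩
    · intro i hi hile hmi
      simp [heappop] at hile
    · rw [List.concat_eq_append, show (b :: t) ++ [z] = b :: (t ++ [z]) from by simp] at hh ⊢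
      rw [heappop_cons_concat]
      have hget : ∀ j, 1 ≤ j → j < t.length + 1 →
          (z :: t).getD j 0 = (b :: (t ++ [z])).getD j 0 := by
        intro j h1 h2
        obtain ⟨j', rfl⟩ : ∃ j', j = j' + 1 := ⟨j - 1, by omega⟩
        simp only [List.getD_cons_succ]
        simp [List.getD_eq_getElem?_getD, List.getElem?_append_left (show j' < t.length by omega)]
      rw [siftup_eqW]
      refine suGoW_PH 0 ((z :: t).getD 0 0) ((z :: t).length - 0) 0 (z :: t) rfl
        (by simp) (inSub_self 0) ?_ ?_
      · intro i hi hile hine hpine _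
        rw [List.length_cons] at hile
        have hp1 : 1 ≤ (i - 1) / 2 := by omega
        rw [hget _ (by omega) hile, hget _ hp1 (by omega)]
        exact hh i hi (by simp; omega) (Nat.zero_le _)
      · intro i _ _ _ hlt
        omega

-- the two minima agree
theorem root_eq_head (h : List Int) (a : Int) (s : List Int)
    (hh : IsHeap h) (hp : h.Perm (a :: s)) (hs : (a :: s).Pairwise (· ≤ ·)) :
    h.getD 0 0 = a := by
  have hne : h ≠ [] := by
    intro hx
    rw [hx] at hp
    exact absurd hp.symm.eq_nil (by simp)
  have hlen : 0 < h.length := List.length_pos_iff.mpr hne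
  have hd0 : h.getD 0 0 = h[0] := by
    simp [List.getD_eq_getElem?_getD, List.getElem?_eq_getElem hlen]
  have hain : a ∈ h := hp.mem_iff.mpr (by simp)
  obtain ⟨j, hj, hja⟩ := List.mem_iff_getElem.mp hain
  have h1 : h.getD 0 0 ≤ a := by
    have := isHeap_root_min h hh j hj
    rwa [show h.getD j 0 = a from by
      simp [List.getD_eq_getElem?_getD, List.getElem?_eq_getElem hj, hja]] at this
  have h0in : h.getD 0 0 ∈ a :: s := hp.mem_iff.mp (hd0 ▸ List.getElem_mem hlen)
  have h2 : a ≤ h.getD 0 0 := by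
    rcases List.mem_cons.mp h0in with he | hm
    · exact le_of_eq he.symm
    · exact (List.pairwise_cons.mp hs).1 _ hm
  omega

theorem loopA_eq_canon : ∀ (fuel : Nat) (h s : List Int) (k c : Int), h.length ≤ fuel → IsHeap h →
    h.Perm s → s.Pairwise (· ≤ ·) → h ≠ [] → loopA fuel h k c = canon s k c := by
  intro fuel
  induction fuel with
  | zero =>
    intro h s k c hlen hh hp hs hne
    exact absurd (List.eq_nil_of_length_eq_zero (by omega)) hne
  | succ f ih =>
    intro h s k c hlen hh hp hs hne
    rcases s with _ | ⟨a, s'⟩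
    · have := hp.length_eq
      simp at this
      exact absurd this hne
    · have hroot : h.getD 0 0 = a := root_eq_head h a s' hh hp hs
      rcases s' with _ | ⟨b, t⟩
      · -- singleton
        have hl1 : h.length = 1 := by simpa using hp.length_eq
        rw [loopA, hroot, hl1]
        by_cases hak : a < k
        · simp [canon, hak]
        · simp [canon, hak]
      · -- at least two elements
        have hl2 : h.length = t.length + 2 := by simpa using hp.length_eq
        by_cases hak : a < k
        · rw [loopA, hroot, if_pos hak, if_neg (by omega : ¬ h.length = 1),
            if_neg (by omega : ¬ h.length < 2)]
          dsimp only
          have hfst1 : (heappop h).1 = a := by rw [heappop_fst h hne, hroot]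
          have hp1 : ((heappop h).1 :: (heappop h).2).Perm (a :: b :: t) :=
            (heappop_perm h hne).symm.trans hp
          rw [hfst1] at hp1
          have hperm1 : (heappop h).2.Perm (b :: t) := hp1.cons_inv
          have hh1 : IsHeap (heappop h).2 := heappop_isHeap h hh
          have hlen1 : (heappop h).2.length = t.length + 1 := by
            rw [hperm1.length_eq]; simp
          have hne1 : (heappop h).2 ≠ [] := by
            intro hx; rw [hx] at hlen1; simp at hlen1
          have hs1 : (b :: t).Pairwise (· ≤ ·) := List.Pairwise.of_cons hs
          have hroot1 : (heappop h).2.getD 0 0 = b := root_eq_head _ b t hh1 hperm1 hs1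
          have hfst2 : (heappop (heappop h).2).1 = b := by rw [heappop_fst _ hne1, hroot1]
          have hp2 : ((heappop (heappop h).2).1 :: (heappop (heappop h).2).2).Perm (b :: t) :=
            (heappop_perm _ hne1).symm.trans hperm1
          rw [hfst2] at hp2
          have hperm2 : (heappop (heappop h).2).2.Perm t := hp2.cons_inv
          have hh2 : IsHeap (heappop (heappop h).2).2 := heappop_isHeap _ hh1
          have hts : t.Pairwise (· ≤ ·) := List.Pairwise.of_cons hs1
          have hveq : a + b * 2 = a + 2 * b := by ring
          have hpushperm : (heappush (heappop (heappop h).2).2 (a + b * 2)).Perm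
              ((a + 2 * b) :: t) := by
            rw [hveq]
            exact (heappush_perm _ _).trans (hperm2.cons _)
          have hpushheap : IsHeap (heappush (heappop (heappop h).2).2 (a + b * 2)) :=
            heappush_isHeap _ _ hh2
          have hlenpush : (heappush (heappop (heappop h).2).2 (a + b * 2)).length
              = t.length + 1 := by
            rw [heappush_length, hperm2.length_eq]
          have hib : (insortB t (a + 2 * b)).Perm ((a + 2 * b) :: t) :=
            insortB_perm t _ hts
          have hibs : (insortB t (a + 2 * b)).Pairwise (· ≤ ·) := insortB_sorted t _ hts
          rw [hfst1, hfst2]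
          rw [show canon (a :: b :: t) k c = canon (insortB t (a + 2 * b)) k (c + 1) from by
            rw [canon]; simp [hak]]
          apply ih _ _ k (c + 1) (by rw [hlenpush]; omega) hpushheap
            (hpushperm.trans hib.symm) hibs
          intro hx
          rw [hx] at hpushperm
          have := hpushperm.length_eq
          simp at this
        · rw [loopA, hroot, if_neg hak]
          rw [canon]
          simp [hak]

-- ===== two-queue side =====

-- invariant of B's state: both queues sorted, and every already-combined value x is
-- ≤ 3·y for every other element y of the pool (which makes appended values monotone)
def InvTQ (base made : List Int) : Prop :=
  base.Pairwise (· ≤ ·) ∧ made.Pairwise (· ≤ ·) ∧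
  (∀ x ∈ made, ∀ y ∈ base, x ≤ 3 * y) ∧
  made.Pairwise (fun x y => x ≤ 3 * y ∧ y ≤ 3 * x)

theorem popMin_sub₁ (base made : List Int) : (popMin base made).2.1.Sublist base := by
  unfold popMin
  rcases base with _ | ⟨b, bt⟩ <;> rcases made with _ | ⟨m, mt⟩ <;> simp
  split <;> simp

theorem popMin_sub₂ (base made : List Int) : (popMin base made).2.2.Sublist made := by
  unfold popMin
  rcases base with _ | ⟨b, bt⟩ <;> rcases made with _ | ⟨m, mt⟩ <;> simp
  split <;> simp

theorem popMin_perm (base made : List Int) (h : base ++ made ≠ []) :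
    ((popMin base made).1 :: ((popMin base made).2.1 ++ (popMin base made).2.2)).Perm
      (base ++ made) := by
  unfold popMin
  rcases base with _ | ⟨b, bt⟩ <;> rcases made with _ | ⟨m, mt⟩ <;> simp_all
  split
  · simp
  · exact List.perm_middle.symm

theorem popMin_min (base made : List Int) (hb : base.Pairwise (· ≤ ·))
    (hm : made.Pairwise (· ≤ ·)) :
    ∀ y ∈ base ++ made, (popMin base made).1 ≤ y := by
  intro y hy
  unfold popMin
  rcases base with _ | ⟨b, bt⟩ <;> rcases made with _ | ⟨m, mt⟩ <;> simp_all
  · rcases hy with rfl | hy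
    · exact le_refl _
    · exact hm.1 y hy
  · rcases hy with rfl | hy
    · exact le_refl _
    · exact hb.1 y hy
  · split
    · rename_i hbm
      simp only
      rcases hy with rfl | hy | rfl | hy
      · exact le_refl _
      · exact hb.1 y hy
      · exact hbm
      · exact le_trans hbm (hm.1 y hy)
    · rename_i hbm
      simp only
      rcases hy with rfl | hy | rfl | hy
      · omega
      · exact le_trans (by omega) (hb.1 y hy)
      · exact le_refl _
      · exact hm.1 y hy

theorem popMin_mem (base made : List Int) (h : base ++ made ≠ []) :
    (popMin base made).1 ∈ base ++ made := by
  have := popMin_perm base made h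
  exact this.mem_iff.mp (by simp)

theorem popMin_inv (base made : List Int) (hI : InvTQ base made) :
    InvTQ (popMin base made).2.1 (popMin base made).2.2 := by
  obtain ⟨h1, h2, h3, h4⟩ := hI
  exact ⟨h1.sublist (popMin_sub₁ base made), h2.sublist (popMin_sub₂ base made),
    fun x hx y hy => h3 x ((popMin_sub₂ base made).mem hx) y ((popMin_sub₁ base made).mem hy),
    h4.sublist (popMin_sub₂ base made)⟩

-- every surviving made-element is ≤ 3 · (the popped value)
theorem popMin_inv3 (base made : List Int) (hI : InvTQ base made) :
    ∀ x ∈ (popMin base made).2.2, x ≤ 3 * (popMin base made).1 := by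
  obtain ⟨h1, h2, h3, h4⟩ := hI
  intro x hx
  rcases base with _ | ⟨b, bt⟩ <;> rcases made with _ | ⟨m, mt⟩
  · simp [popMin] at hx
  · simp only [popMin] at hx ⊢
    exact ((List.pairwise_cons.mp h4).1 x hx).2
  · simp [popMin] at hx
  · by_cases hbm : b ≤ m
    · simp only [popMin, if_pos hbm] at hx ⊢
      rcases List.mem_cons.mp hx with rfl | hx'
      · exact h3 x (by simp) b (by simp)
      · exact h3 x (by simp [hx']) b (by simp)
    · simp only [popMin, if_neg hbm] at hx ⊢
      exact ((List.pairwise_cons.mp h4).1 x hx).2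

theorem frontMin_eq_popMin (base made : List Int) :
    frontMin base made = (popMin base made).1 := by
  unfold frontMin popMin
  rcases base with _ | ⟨b, bt⟩ <;> rcases made with _ | ⟨m, mt⟩ <;> simp
  split <;> simp

theorem min_unique (v h : Int) (l1 l2 : List Int) (hp : l1.Perm l2)
    (hv : v ∈ l1) (hh : h ∈ l2) (hvmin : ∀ y ∈ l1, v ≤ y) (hhmin : ∀ y ∈ l2, h ≤ y) :
    v = h := by
  have h1 : v ≤ h := hvmin h (hp.mem_iff.mpr hh)
  have h2 : h ≤ v := hhmin v (hp.mem_iff.mp hv)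
  omega

theorem loopTQ_eq_canon : ∀ (fuel : Nat) (base made s : List Int) (k c : Int),
    base.length + made.length ≤ fuel → InvTQ base made →
    s.Pairwise (· ≤ ·) → s.Perm (base ++ made) →
    loopTQ fuel base made k c = canon s k c := by
  intro fuel
  induction fuel with
  | zero =>
    intro base made s k c hlen hI hs hp
    have hb0 : base = [] := by rcases base <;> simp_all
    have hm0 : made = [] := by rcases made <;> simp_all
    subst hb0; subst hm0
    have hs0 : s = [] := hp.eq_nil
    subst hs0
    rw [loopTQ, canon]
  | succ f ih =>
    intro base made s k c hlen hI hs hp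
    obtain ⟨hb, hm, h3, h4⟩ := hI
    by_cases hz : base.length + made.length = 0
    · -- empty state
      have hb0 : base = [] := by rcases base <;> simp_all
      have hm0 : made = [] := by rcases made <;> simp_all
      subst hb0; subst hm0
      have hs0 : s = [] := hp.eq_nil
      subst hs0
      rw [loopTQ, canon]
      simp
    · -- nonempty
      have hne : base ++ made ≠ [] := by
        intro hx
        have := congrArg List.length hx
        rw [List.length_append, List.length_nil] at this
        omega
      rcases s with _ | ⟨h, t⟩
      · have := hp.length_eq; simp at this; omega
      -- head of s is the front minimum
      set p1 := popMin base made with hp1def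
      have hv1 : p1.1 = h := by
        apply min_unique p1.1 h (base ++ made) (h :: t) (List.Perm.symm hp)
          (popMin_mem base made hne) (by simp)
          (popMin_min base made hb hm)
        intro y hy
        rcases List.mem_cons.mp hy with rfl | hy'
        · exact le_refl _
        · exact (List.pairwise_cons.mp hs).1 y hy'
      have hfm : frontMin base made = h := by rw [frontMin_eq_popMin, hp1def] at *; omega
      rw [loopTQ, if_neg (by omega : ¬ base.length + made.length = 0), hfm]
      by_cases hk : k ≤ h
      · -- return count
        rw [if_pos hk]
        rcases t with _ | ⟨h2, t'⟩
        · rw [canon]; simp; omega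
        · rw [canon]; simp; omega
      · rw [if_neg hk]
        by_cases hone : base.length + made.length = 1
        · rw [if_pos hone]
          have hsl := hp.length_eq
          rw [List.length_append] at hsl
          rcases t with _ | ⟨h2, t'⟩
          · rw [canon]; simp; omega
          · simp at hsl; omega
        · rw [if_neg hone]
          -- two elements at least
          have hlen2 : 2 ≤ base.length + made.length := by omega
          rcases t with _ | ⟨h2, t'⟩
          · have := hp.length_eq; simp at this; omega
          -- first pop
          have hperm1 : (p1.2.1 ++ p1.2.2).Perm (h2 :: t') := by
            have := (popMin_perm base made hne).trans hp.symm
            rw [hv1] at this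
            exact this.cons_inv
          have hI1 : InvTQ p1.2.1 p1.2.2 := popMin_inv base made ⟨hb, hm, h3, h4⟩
          obtain ⟨hb1, hm1, h31, h41⟩ := hI1
          have hne1 : p1.2.1 ++ p1.2.2 ≠ [] := by
            intro hx
            have := hperm1.length_eq
            rw [hx] at this
            simp at this
          set p2 := popMin p1.2.1 p1.2.2 with hp2def
          have hs1 : (h2 :: t').Pairwise (· ≤ ·) := List.Pairwise.of_cons hs
          have hv2 : p2.1 = h2 := by
            apply min_unique p2.1 h2 (p1.2.1 ++ p1.2.2) (h2 :: t') hperm1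
              (popMin_mem _ _ hne1) (by simp)
              (popMin_min _ _ hb1 hm1)
            intro y hy
            rcases List.mem_cons.mp hy with rfl | hy'
            · exact le_refl _
            · exact (List.pairwise_cons.mp hs1).1 y hy'
          have hperm2 : (p2.2.1 ++ p2.2.2).Perm t' := by
            have := (popMin_perm p1.2.1 p1.2.2 hne1).trans hperm1
            rw [hv2] at this
            exact this.cons_inv
          have hI2 : InvTQ p2.2.1 p2.2.2 := popMin_inv _ _ ⟨hb1, hm1, h31, h41⟩
          obtain ⟨hb2, hm2, h32, h42⟩ := hI2
          -- facts about a := p1.1 = h, b := p2.1 = h2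
          have hab : h ≤ h2 := (List.pairwise_cons.mp hs).1 h2 (by simp)
          set v := h + 2 * h2 with hvdef
          -- elements of p2.2.2 : survivors from made
          have hx3a : ∀ x ∈ p2.2.2, x ≤ 3 * h := by
            intro x hx
            have e := popMin_inv3 base made ⟨hb, hm, h3, h4⟩ x
              ((popMin_sub₂ p1.2.1 p1.2.2).mem hx)
            rw [← hp1def, hv1] at e
            exact e
          have hx3b : ∀ x ∈ p2.2.2, x ≤ 3 * h2 := by
            intro x hx
            have e := popMin_inv3 p1.2.1 p1.2.2 ⟨hb1, hm1, h31, h41⟩ x hx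
            rw [← hp2def, hv2] at e
            exact e
          have hbx : ∀ x ∈ p2.2.1 ++ p2.2.2, h2 ≤ x := by
            intro x hx
            have hx' : x ∈ p1.2.1 ++ p1.2.2 := by
              rcases List.mem_append.mp hx with hh | hh
              · exact List.mem_append.mpr (Or.inl ((popMin_sub₁ _ _).mem hh))
              · exact List.mem_append.mpr (Or.inr ((popMin_sub₂ _ _).mem hh))
            have e := popMin_min p1.2.1 p1.2.2 hb1 hm1 x hx'
            rw [← hp2def, hv2] at e
            exact e
          -- b = h2 ≥ 0 whenever some made survivor exists; per-element facts:
          have hvx : ∀ x ∈ p2.2.2, x ≤ v := by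
            intro x hx
            have e1 := hx3a x hx
            have e2 := hx3b x hx
            have e3 := hbx x (List.mem_append.mpr (Or.inr hx))
            -- h2 ≤ x ≤ 3h2 ⟹ h2 ≥ 0; v - x ≥ v - 3h = 2(h2 - h) ≥ 0
            omega
          -- new invariant
          have hmade' : (p2.2.2 ++ [v]).Pairwise (· ≤ ·) := by
            rw [List.pairwise_append]
            exact ⟨hm2, by simp, fun x hx y hy => by
              rcases List.mem_singleton.mp hy with rfl
              exact hvx x hx⟩
          have hcross' : ∀ x ∈ p2.2.2 ++ [v], ∀ y ∈ p2.2.1, x ≤ 3 * y := by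
            intro x hx y hy
            have hy2 := hbx y (List.mem_append.mpr (Or.inl hy))
            rcases List.mem_append.mp hx with hh | hh
            · exact h32 x hh y hy
            · rcases List.mem_singleton.mp hh with rfl
              omega
          have hp3' : (p2.2.2 ++ [v]).Pairwise (fun x y => x ≤ 3 * y ∧ y ≤ 3 * x) := by
            rw [List.pairwise_append]
            refine ⟨h42, by simp, fun x hx y hy => ?_⟩
            rcases List.mem_singleton.mp hy with rfl
            have e1 := hx3a x hx
            have e2 := hx3b x hx
            have e3 := hbx x (List.mem_append.mpr (Or.inr hx))
            constructor <;> omega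
          -- sorted successor list
          have hts : t'.Pairwise (· ≤ ·) := List.Pairwise.of_cons hs1
          have hins_s : (insortB t' v).Pairwise (· ≤ ·) := insortB_sorted t' v hts
          have hins_p : (insortB t' v).Perm (p2.2.1 ++ (p2.2.2 ++ [v])) := by
            have e1 : (p2.2.1 ++ (p2.2.2 ++ [v])) = ((p2.2.1 ++ p2.2.2) ++ [v]) := by
              simp
            rw [e1]
            exact ((insortB_perm t' v hts).trans (hperm2.symm.cons v)).trans
              (List.perm_append_singleton v (p2.2.1 ++ p2.2.2)).symm
          -- lengths
          have hlen' : p2.2.1.length + (p2.2.2 ++ [v]).length + 1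
              = base.length + made.length := by
            have l1 := popMin_len base made (by omega)
            have l2 := popMin_len p1.2.1 p1.2.2 (by
              intro hx
              apply hne1
              rcases p1.2.1 <;> rcases p1.2.2 <;> simp_all)
            rw [← hp1def] at l1
            rw [← hp2def] at l2
            simp only [List.length_append, List.length_cons, List.length_nil]
            omega
          have hrec := ih p2.2.1 (p2.2.2 ++ [v]) (insortB t' v) k (c + 1)
            (by omega) ⟨hb2, hmade', hcross', hp3'⟩ hins_s hins_p
          rw [show canon (h :: h2 :: t') k c = canon (insortB t' (h + 2 * h2)) k (c + 1) from by
            rw [canon]; simp [show h < k from by omega]]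
          simp only [← hvdef]
          rw [← hrec]
          simp only [← hp1def, ← hp2def, hv1, hv2, ← hvdef]

-- ===== VERDICT (by name: the statement is the Claim_ definition above) =====
theorem solution_spec : Claim_equal_solution := by
  intro scoville k _ hpre
  unfold Spec_solution solution solution_alt
  have hsorted := PySem.List.sorted_pairwise scoville (fun x => x)
  have hperm := (PySem.List.sorted_perm scoville (fun x => x) false).symm
  have hhl : (heapify scoville).length = scoville.length :=
    (heapify_perm scoville).length_eq
  have hsl : (PySem.List.sorted scoville (fun x => x)).length = scoville.length :=
    hperm.length_eq.symm
  have hA : loopA scoville.length (heapify scoville) k 0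
      = canon (PySem.List.sorted scoville (fun x => x)) k 0 := by
    apply loopA_eq_canon scoville.length _ _ k 0 (by omega) (heapify_isHeap scoville)
      ((heapify_perm scoville).trans hperm) hsorted
    intro hemp
    exact hpre (List.eq_nil_of_length_eq_zero (by
      rw [hemp] at hhl
      simpa using hhl.symm))
  have hB : loopTQ scoville.length (PySem.List.sorted scoville (fun x => x)) [] k 0
      = canon (PySem.List.sorted scoville (fun x => x)) k 0 := by
    apply loopTQ_eq_canon scoville.length _ _ _ k 0 (by simp [hsl])
      ⟨hsorted, by simp, by simp, by simp⟩ hsorted (by simp)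
  rw [hA, hB]
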